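-- pv_equiv track=rewrite | github.com/StatewideOwl3/slm-benchmarking-qidk | Summarization/evaluate.py | overlap_counts
-- ===== SOURCE A (Python) =====
-- from typing import Any, Dict, List, Optional, Sequence
--
-- def overlap_counts(pred_tokens: List[str], ref_tokens: List[str]) -> int:
--     ref_freq: Dict[str, int] = {}
--     for token in ref_tokens:
--         ref_freq[token] = ref_freq.get(token, 0) + 1
--     overlap = 0
--     for token in pred_tokens:
--         if ref_freq.get(token, 0) > 0:
--             overlap += 1
--             ref_freq[token] -= 1
--     return overlap
-- ===== SOURCE B (Python) =====
-- def overlap_counts(pred_tokens, ref_tokens):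
--     pred_freq = {}
--     for token in pred_tokens:
--         pred_freq[token] = pred_freq.get(token, 0) + 1
--     ref_freq = {}
--     for token in ref_tokens:
--         ref_freq[token] = ref_freq.get(token, 0) + 1
--     total = 0
--     for token, count in pred_freq.items():
--         total += min(count, ref_freq.get(token, 0))
--     return total
-- ===== Notes on version B (the rewrite author's own statement) =====
-- stated objective: alternative
-- what changed: Replaced A's single reference table with streaming decrement-and-count over pred_tokens by building complete frequency tables for both lists and summing min(pred_count, ref_count) over the distinct predicted tokens.
import Mathlib
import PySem

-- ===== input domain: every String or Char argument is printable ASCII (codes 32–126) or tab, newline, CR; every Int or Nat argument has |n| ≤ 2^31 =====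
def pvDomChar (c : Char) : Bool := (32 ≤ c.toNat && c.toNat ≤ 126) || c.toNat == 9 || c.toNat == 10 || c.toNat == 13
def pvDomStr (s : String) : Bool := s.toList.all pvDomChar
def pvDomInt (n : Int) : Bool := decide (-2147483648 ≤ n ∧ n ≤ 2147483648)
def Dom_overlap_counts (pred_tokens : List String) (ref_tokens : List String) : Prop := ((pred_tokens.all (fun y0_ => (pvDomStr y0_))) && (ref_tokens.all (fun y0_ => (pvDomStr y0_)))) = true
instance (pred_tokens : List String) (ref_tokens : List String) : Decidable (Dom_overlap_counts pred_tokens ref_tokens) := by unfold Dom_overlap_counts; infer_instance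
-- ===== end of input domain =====

-- B builds complete frequency tables for BOTH token lists and sums min(pred_count, ref_count)
-- over the distinct predicted tokens, instead of A's streaming decrement over one table (alternative decomposition, same cost).


-- ===== PORT A =====
-- A: build ref_freq by counting ref_tokens, then stream over pred_tokens, counting a hit and
-- decrementing whenever the table still holds a positive count for the token.
def overlap_counts (pred_tokens : List String) (ref_tokens : List String) : Int :=
  let ref_freq : PySem.Dict String Int :=
    ref_tokens.foldl (fun d token => d.insert token (d.getD token 0 + 1)) PySem.Dict.empty
  let st :=
    pred_tokens.foldl
      (fun (s : PySem.Dict String Int × Int) token =>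
        if s.1.getD token 0 > 0 then (s.1.insert token (s.1.getD token 0 - 1), s.2 + 1) else s)
      (ref_freq, 0)
  st.2

-- ===== PORT B =====
-- B: build pred_freq and ref_freq, then iterate over pred_freq.items adding min(count, ref count).
def overlap_counts_alt (pred_tokens : List String) (ref_tokens : List String) : Int :=
  let pred_freq : PySem.Dict String Int :=
    pred_tokens.foldl (fun d token => d.insert token (d.getD token 0 + 1)) PySem.Dict.empty
  let ref_freq : PySem.Dict String Int :=
    ref_tokens.foldl (fun d token => d.insert token (d.getD token 0 + 1)) PySem.Dict.empty
  pred_freq.items.foldl (fun total kv => total + min kv.2 (ref_freq.getD kv.1 0)) 0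

-- ===== PRECONDITION & SPEC =====
def Spec_overlap_counts (pred_tokens : List String) (ref_tokens : List String) (out : Int) : Prop := out = overlap_counts_alt pred_tokens ref_tokens
instance (pred_tokens : List String) (ref_tokens : List String) (out : Int) : Decidable (Spec_overlap_counts pred_tokens ref_tokens out) := by unfold Spec_overlap_counts; infer_instance

-- ===== CLAIM (what is proved, stated in full; the proofs are below) =====
def Claim_equal_overlap_counts : Prop := ∀ (pred_tokens : List String) (ref_tokens : List String), Dom_overlap_counts pred_tokens ref_tokens → Spec_overlap_counts pred_tokens ref_tokens (overlap_counts pred_tokens ref_tokens)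

-- ===== LEMMAS AND PROOFS =====

-- A's streaming loop over `pred`, started from any nonnegative table `d`, computes
-- ov + Σ_{k ∈ S} min(count of k in pred, d[k]) for any finite S covering pred's tokens.
theorem streamLoop_eq_sum_min (pred : List String) :
    ∀ (d : PySem.Dict String Int) (ov : Int) (S : Finset String),
      (∀ t ∈ pred, t ∈ S) → (∀ t, 0 ≤ d.getD t 0) →
      (pred.foldl
        (fun (s : PySem.Dict String Int × Int) token =>
          if s.1.getD token 0 > 0 then (s.1.insert token (s.1.getD token 0 - 1), s.2 + 1) else s)
        (d, ov)).2
      = ov + ∑ k ∈ S, min ((pred.count k : Int)) (d.getD k 0) := by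
  induction pred with
  | nil =>
    intro d ov S _ hnn
    simp only [List.foldl_nil, List.count_nil, Nat.cast_zero]
    have : ∀ k ∈ S, min ((0 : Int)) (d.getD k 0) = 0 := by
      intro k _; have := hnn k; omega
    rw [Finset.sum_congr rfl this]
    simp
  | cons t ts ih =>
    intro d ov S hmem hnn
    have htS : t ∈ S := hmem t (by simp)
    have hsplit : ∀ (f : String → Int),
        ∑ k ∈ S, f k = f t + ∑ k ∈ S.erase t, f k := by
      intro f; rw [Finset.add_sum_erase S f htS]
    have hcount : ∀ k : String, List.count k (t :: ts) =
        List.count k ts + (if t = k then 1 else 0) := by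
      intro k; rw [List.count_cons]; simp
    simp only [List.foldl_cons]
    by_cases h : d.getD t 0 > 0
    · simp only [h, if_true]
      have hnn' : ∀ k, 0 ≤ (d.insert t (d.getD t 0 - 1)).getD k 0 := by
        intro k
        rw [PySem.Dict.getD_insert]
        split
        · omega
        · exact hnn k
      rw [ih (d.insert t (d.getD t 0 - 1)) (ov + 1) S (fun x hx => hmem x (by simp [hx])) hnn']
      rw [hsplit (fun k => min ((ts.count k : Int)) ((d.insert t (d.getD t 0 - 1)).getD k 0)),
          hsplit (fun k => min (((t :: ts).count k : Int)) (d.getD k 0))]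
      have hrest : ∑ k ∈ S.erase t,
          min ((ts.count k : Int)) ((d.insert t (d.getD t 0 - 1)).getD k 0)
          = ∑ k ∈ S.erase t, min (((t :: ts).count k : Int)) (d.getD k 0) := by
        apply Finset.sum_congr rfl
        intro k hk
        have hne : k ≠ t := Finset.ne_of_mem_erase hk
        rw [PySem.Dict.getD_insert, if_neg hne, hcount k, if_neg (fun he => hne he.symm)]
        simp
      rw [hrest]
      have hterm : min (((t :: ts).count t : Int)) (d.getD t 0)
          = 1 + min ((ts.count t : Int)) ((d.insert t (d.getD t 0 - 1)).getD t 0) := by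
        rw [PySem.Dict.getD_insert, if_pos rfl, hcount t, if_pos rfl]
        push_cast
        omega
      rw [hterm]
      ring
    · simp only [h, if_false]
      have h0 : d.getD t 0 = 0 := by have := hnn t; omega
      rw [ih d ov S (fun x hx => hmem x (by simp [hx])) hnn]
      rw [hsplit (fun k => min ((ts.count k : Int)) (d.getD k 0)),
          hsplit (fun k => min (((t :: ts).count k : Int)) (d.getD k 0))]
      have hrest : ∑ k ∈ S.erase t, min ((ts.count k : Int)) (d.getD k 0)
          = ∑ k ∈ S.erase t, min (((t :: ts).count k : Int)) (d.getD k 0) := by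
        apply Finset.sum_congr rfl
        intro k hk
        have hne : k ≠ t := Finset.ne_of_mem_erase hk
        rw [hcount k, if_neg (fun he => hne he.symm)]
        simp
      have hterm : min ((ts.count t : Int)) (d.getD t 0)
          = min (((t :: ts).count t : Int)) (d.getD t 0) := by
        rw [h0, hcount t]; push_cast; omega
      rw [hrest, hterm]

-- Both sides equal Σ_{k ∈ distinct pred tokens} min(pred.count k, ref.count k).
theorem overlap_counts_eq (pred_tokens ref_tokens : List String) :
    overlap_counts pred_tokens ref_tokens = overlap_counts_alt pred_tokens ref_tokens := by
  unfold overlap_counts overlap_counts_alt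
  simp only [PySem.Dict.foldl_insert_getD_add_one_eq_counter]
  rw [PySem.Dict.items_counter]
  -- B side: foldl of adds = sum over the distinct pred tokens
  rw [PySem.List.foldl_add _ (fun kv : String × Int =>
        min kv.2 ((PySem.Dict.counter ref_tokens).getD kv.1 0))]
  rw [List.map_map]
  -- A side: the streaming loop
  rw [streamLoop_eq_sum_min pred_tokens (PySem.Dict.counter ref_tokens) 0
        (PySem.Set.ofList pred_tokens).toFinset
        (fun t ht => List.mem_toFinset.mpr ((PySem.Set.mem_ofList pred_tokens t).mpr ht))
        (fun t => by rw [PySem.Dict.getD_counter]; exact Int.natCast_nonneg _)]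
  rw [List.sum_toFinset _ (PySem.Set.nodup_ofList pred_tokens)]
  simp [PySem.Dict.getD_counter, Function.comp_def]

-- ===== VERDICT (by name: the statement is the Claim_ definition above) =====
theorem overlap_counts_spec : Claim_equal_overlap_counts := by
  intro pred_tokens ref_tokens _
  unfold Spec_overlap_counts
  exact overlap_counts_eq pred_tokens ref_tokens
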